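-- pv_equiv track=rewrite | github.com/prabowo02/project_euler | codes/PE299.py | solve
-- ===== SOURCE A (Python) =====
-- def solve(N):
--     q, ans = [(1, 2)], 0
--     for n, m in q:
--         a = m*m - n*n
--         b = 2*m*n
--         c = m*m + n*n
--
--         if a + b >= N:
--             continue
--
--         q.append((n, n + m))
--         q.append((m, n + m))
--
--         if n % 2 == 1 and m % 2 == 1:
--             continue
--
--         ans += (N - 1) // (a + b) * 2  # (3, 4, 5) and (4, 3, 5) are distinct
--         ans += (N - 1) // (c * 2)
--
--     return ans
-- ===== SOURCE B (Python) =====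
-- def solve(N):
--     # DFS over the primitive-triple tree: recursion follows only the (m, n+m) branch
--     # while the (n, n+m) chain is walked by the inner while loop (depth stays O(log N)).
--     def go(n, m):
--         total = 0
--         while m*m + 2*m*n - n*n < N:
--             if not (n % 2 == 1 and m % 2 == 1):
--                 total += (N - 1) // (m*m + 2*m*n - n*n) * 2
--                 total += (N - 1) // (2 * (m*m + n*n))
--             total += go(m, n + m)
--             m += n
--         return total
--     return go(1, 2)
-- ===== Notes on version B (the rewrite author's own statement) =====
-- stated objective: alternative
-- what changed: Replaces the BFS over an ever-growing materialised queue of (n,m) pairs by a recursive DFS over the primitive-triple tree in which only the (m,n+m) branch recurses while the (n,n+m) chain is walked by an inner while loop (recursion depth stays logarithmic); the summed answer is order-independent.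
import Mathlib
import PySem

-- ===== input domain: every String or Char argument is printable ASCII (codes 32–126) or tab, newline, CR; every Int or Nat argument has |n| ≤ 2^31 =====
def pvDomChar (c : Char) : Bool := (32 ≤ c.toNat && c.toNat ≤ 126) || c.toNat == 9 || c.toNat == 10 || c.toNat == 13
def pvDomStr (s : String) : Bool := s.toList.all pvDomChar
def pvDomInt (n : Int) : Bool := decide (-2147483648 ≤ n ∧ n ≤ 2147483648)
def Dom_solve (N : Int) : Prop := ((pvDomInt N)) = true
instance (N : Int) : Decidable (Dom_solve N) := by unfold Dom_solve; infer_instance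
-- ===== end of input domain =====

-- B replaces A's queue-BFS over the primitive-triple tree by a DFS whose recursion follows
-- only the (m,n+m) branch, walking the (n,n+m) chain with an inner loop; no queue is built.

-- ===== PORT A =====

-- queue entries: the pairs A ever enqueues all satisfy 1 ≤ n < m (carried for termination)
def PPair : Type := {p : Int × Int // 1 ≤ p.1 ∧ p.1 < p.2}

-- a+b of the triple generated by (n,m); strictly increases along tree edges
def pvAB (n m : Int) : Int := m * m - n * n + 2 * m * n

def pvMu (N n m : Int) : Nat := (N - pvAB n m).toNat

def pvW (N : Int) (q : List PPair) : Nat :=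
  (q.map (fun p => 3 ^ pvMu N p.val.1 p.val.2)).sum

theorem pvPow3_add_lt {a b c : Nat} (ha : a < c) (hb : b < c) : 3 ^ a + 3 ^ b < 3 ^ c := by
  have h1 : 3 ^ a ≤ 3 ^ (c - 1) := Nat.pow_le_pow_right (by norm_num) (by omega)
  have h2 : 3 ^ b ≤ 3 ^ (c - 1) := Nat.pow_le_pow_right (by norm_num) (by omega)
  have h3 : 3 ^ c = 3 * 3 ^ (c - 1) := by
    rw [← pow_succ']; congr 1; omega
  have h4 : 1 ≤ 3 ^ (c - 1) := Nat.one_le_pow _ _ (by norm_num)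
  omega

theorem pvMu_chain (N n m : Int) (hn : 1 ≤ n) (_hnm : n < m)
    (hlt : m * m + 2 * m * n - n * n < N) : pvMu N n (n + m) < pvMu N n m := by
  unfold pvMu pvAB
  exact (Int.toNat_lt_toNat (by nlinarith)).mpr (by nlinarith)

theorem pvMu_branch (N n m : Int) (hn : 1 ≤ n) (_hnm : n < m)
    (hlt : m * m + 2 * m * n - n * n < N) : pvMu N m (n + m) < pvMu N n m := by
  unfold pvMu pvAB
  exact (Int.toNat_lt_toNat (by nlinarith)).mpr (by nlinarith)

-- transliteration of A's 'for n, m in q' queue loop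
def loopA (N : Int) (q : List PPair) (ans : Int) : Int :=
  match q with
  | [] => ans
  | ⟨(n, m), h⟩ :: rest =>
    let a := m * m - n * n
    let b := 2 * m * n
    let c := m * m + n * n
    if hge : a + b ≥ N then loopA N rest ans
    else
      let rest' := rest ++ [⟨(n, n + m), by constructor <;> [exact h.1; omega]⟩,
                            ⟨(m, n + m), by constructor <;> [omega; omega]⟩]
      if PySem.Int.mod n 2 = 1 ∧ PySem.Int.mod m 2 = 1 then loopA N rest' ans
      else loopA N rest'
        (ans + PySem.Int.floordiv (N - 1) (a + b) * 2 + PySem.Int.floordiv (N - 1) (c * 2))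
termination_by pvW N q
decreasing_by
  · unfold pvW
    simp only [List.map_cons, List.sum_cons]
    have : 1 ≤ 3 ^ pvMu N n m := Nat.one_le_pow _ _ (by norm_num)
    omega
  all_goals
  · unfold pvW
    simp only [List.map_cons, List.sum_cons, List.map_append, List.sum_append, List.map_nil,
      List.sum_nil]
    have hlt : m * m + 2 * m * n - n * n < N := by linarith
    have h1 := pvMu_chain N n m h.1 h.2 hlt
    have h2 := pvMu_branch N n m h.1 h.2 hlt
    have := pvPow3_add_lt h1 h2
    omega

def solve (N : Int) : Int := loopA N [⟨(1, 2), by norm_num⟩] 0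

-- ===== PORT B =====

-- transliteration of B's go(n, m): the while loop is the recursion on (n, m+n) carrying
-- 'total'; the recursive call go(m, n+m) starts a fresh accumulator 0.
def goB (N n m total : Int) (hn : 1 ≤ n) (hnm : n < m) : Int :=
  if hlt : m * m + 2 * m * n - n * n < N then
    goB N n (m + n)
      (total +
        (if ¬(PySem.Int.mod n 2 = 1 ∧ PySem.Int.mod m 2 = 1) then
          PySem.Int.floordiv (N - 1) (m * m + 2 * m * n - n * n) * 2 +
            PySem.Int.floordiv (N - 1) (2 * (m * m + n * n))
         else 0) +
        goB N m (n + m) 0 (by omega) (by omega))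
      hn (by omega)
  else total
termination_by pvMu N n m
decreasing_by
  all_goals first
    | exact pvMu_branch N n m hn hnm hlt
    | (rw [show m + n = n + m from add_comm m n]; exact pvMu_chain N n m hn hnm hlt)

def solve_alt (N : Int) : Int := goB N 1 2 0 (by norm_num) (by norm_num)

-- ===== PRECONDITION & SPEC =====
def Spec_solve (N : Int) (out : Int) : Prop := out = solve_alt N
instance (N : Int) (out : Int) : Decidable (Spec_solve N out) := by unfold Spec_solve; infer_instance

-- ===== CLAIM (what is proved, stated in full; the proofs are below) =====
def Claim_equal_solve : Prop := ∀ (N : Int), Dom_solve N → Spec_solve N (solve N)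

-- ===== LEMMAS AND PROOFS =====

-- the accumulator of B's while loop factors out
theorem goB_acc (N : Int) : ∀ (k : Nat) (n m total : Int) (hn : 1 ≤ n) (hnm : n < m),
    pvMu N n m = k → goB N n m total hn hnm = total + goB N n m 0 hn hnm := by
  intro k
  induction k using Nat.strong_induction_on with
  | _ k ih =>
    intro n m total hn hnm hk
    by_cases hlt : m * m + 2 * m * n - n * n < N
    · conv_lhs => rw [goB]
      conv_rhs => rw [goB]
      simp only [dif_pos hlt]
      have hmu : pvMu N n (m + n) < k := by
        rw [← hk]
        have := pvMu_chain N n m hn hnm hlt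
        rwa [add_comm n m] at this
      rw [ih _ hmu n (m + n) _ hn (by omega) rfl]
      conv_rhs => rw [ih _ hmu n (m + n) _ hn (by omega) rfl]
      ring
    · conv_lhs => rw [goB]
      conv_rhs => rw [goB]
      simp only [dif_neg hlt]
      simp

-- one step of B's recursion, restated as the plain DFS expansion at a contributing node
theorem goB_expand (N n m : Int) (hn : 1 ≤ n) (hnm : n < m)
    (hlt : m * m + 2 * m * n - n * n < N) :
    goB N n m 0 hn hnm =
      (if ¬(PySem.Int.mod n 2 = 1 ∧ PySem.Int.mod m 2 = 1) then
          PySem.Int.floordiv (N - 1) (m * m + 2 * m * n - n * n) * 2 +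
            PySem.Int.floordiv (N - 1) (2 * (m * m + n * n))
       else 0) +
      goB N n (n + m) 0 hn (by omega) + goB N m (n + m) 0 (by omega) (by omega) := by
  rw [goB]
  simp only [dif_pos hlt]
  rw [goB_acc N (pvMu N n (m + n)) n (m + n) _ hn (by omega) rfl]
  have : m + n = n + m := by ring
  simp only [this]
  ring

theorem goB_stop (N n m : Int) (hn : 1 ≤ n) (hnm : n < m)
    (hge : ¬ m * m + 2 * m * n - n * n < N) :
    goB N n m 0 hn hnm = 0 := by
  rw [goB]; simp only [dif_neg hge]

def pvSum (N : Int) (q : List PPair) : Int :=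
  (q.map (fun p => goB N p.val.1 p.val.2 0 p.prop.1 p.prop.2)).sum

-- A's queue loop computes ans plus the DFS values of everything still queued
theorem loopA_eq_sum (N : Int) : ∀ (k : Nat) (q : List PPair) (ans : Int),
    pvW N q = k → loopA N q ans = ans + pvSum N q := by
  intro k
  induction k using Nat.strong_induction_on with
  | _ k ih =>
    intro q ans hk
    match q with
    | [] => simp [loopA, pvSum]
    | ⟨(n, m), h⟩ :: rest =>
      rw [loopA]
      simp only []
      have hone : 1 ≤ 3 ^ pvMu N n m := Nat.one_le_pow _ _ (by norm_num)
      by_cases hge : m * m - n * n + 2 * m * n ≥ N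
      · have hge' : m * m - n * n + 2 * m * n ≥ N := hge
        simp only [dif_pos hge]
        have hw : pvW N rest < k := by
          rw [← hk]; unfold pvW; simp only [List.map_cons, List.sum_cons]; omega
        rw [ih _ hw rest ans rfl]
        unfold pvSum
        simp only [List.map_cons, List.sum_cons]
        rw [goB_stop N n m h.1 h.2 (by omega)]
        ring
      · simp only [dif_neg hge]
        have hlt : m * m + 2 * m * n - n * n < N := by omega
        have hw : ∀ (p1 p2 : PPair), p1.val = (n, n + m) → p2.val = (m, n + m) →
            pvW N (rest ++ [p1, p2]) < k := by
          intro p1 p2 e1 e2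
          rw [← hk]; unfold pvW
          simp only [List.map_cons, List.sum_cons, List.map_append, List.sum_append,
            List.map_nil, List.sum_nil, e1, e2]
          have h1 := pvMu_chain N n m h.1 h.2 hlt
          have h2 := pvMu_branch N n m h.1 h.2 hlt
          have := pvPow3_add_lt h1 h2
          omega
        have hsum : ∀ (p1 p2 : PPair),
            pvSum N (rest ++ [p1, p2]) =
              pvSum N rest + goB N p1.val.1 p1.val.2 0 p1.prop.1 p1.prop.2 +
                goB N p2.val.1 p2.val.2 0 p2.prop.1 p2.prop.2 := by
          intro p1 p2
          unfold pvSum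
          simp only [List.map_append, List.sum_append, List.map_cons, List.sum_cons,
            List.map_nil, List.sum_nil]
          ring
        by_cases hodd : PySem.Int.mod n 2 = 1 ∧ PySem.Int.mod m 2 = 1
        · simp only [if_pos hodd]
          rw [ih _ (hw _ _ rfl rfl) _ ans rfl, hsum]
          unfold pvSum
          simp only [List.map_cons, List.sum_cons]
          rw [goB_expand N n m h.1 h.2 hlt]
          simp only [if_neg (not_not_intro hodd)]
          ring
        · simp only [if_neg hodd]
          rw [ih _ (hw _ _ rfl rfl) _ _ rfl, hsum]
          unfold pvSum
          simp only [List.map_cons, List.sum_cons]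
          rw [goB_expand N n m h.1 h.2 hlt]
          simp only [if_pos hodd]
          ring

-- ===== VERDICT (by name: the statement is the Claim_ definition above) =====
theorem solve_spec : Claim_equal_solve := by
  intro N _
  unfold Spec_solve solve solve_alt
  rw [loopA_eq_sum N (pvW N _) _ 0 rfl]
  unfold pvSum
  simp
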